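-- pv_equiv track=rewrite | github.com/ishaanmeena/hacker-rank | Designer PDF Viewer.py | designerPdfViewer
-- ===== SOURCE A (Python) =====
-- import string
--
-- def designerPdfViewer(h, word):
--     my_dict={}
--     s = list()
--     test_list = list(string.ascii_lowercase)
--     for (a, b) in zip(test_list, h):
--         my_dict[a] = b
--     for key,val in my_dict.items():
--         if key in word:
--             s.append(val)
--     m = max(s)
--     l = len(word)
--     return m*l
-- ===== SOURCE B (Python) =====
-- import string
--
-- def designerPdfViewer(h, word):
--     my_dict = dict(zip(string.ascii_lowercase, h))
--     return max(my_dict[c] for c in word if c in my_dict) * len(word)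
-- ===== Notes on version B (the rewrite author's own statement) =====
-- stated objective: simpler
-- what changed: B inverts the iteration: instead of A's loop over all 26 dict entries with a substring test `key in word` per entry plus an explicit accumulator list, B scans the characters of the word once, looking each up in the dict, and takes the max of the gathered heights directly.
import Mathlib
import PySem

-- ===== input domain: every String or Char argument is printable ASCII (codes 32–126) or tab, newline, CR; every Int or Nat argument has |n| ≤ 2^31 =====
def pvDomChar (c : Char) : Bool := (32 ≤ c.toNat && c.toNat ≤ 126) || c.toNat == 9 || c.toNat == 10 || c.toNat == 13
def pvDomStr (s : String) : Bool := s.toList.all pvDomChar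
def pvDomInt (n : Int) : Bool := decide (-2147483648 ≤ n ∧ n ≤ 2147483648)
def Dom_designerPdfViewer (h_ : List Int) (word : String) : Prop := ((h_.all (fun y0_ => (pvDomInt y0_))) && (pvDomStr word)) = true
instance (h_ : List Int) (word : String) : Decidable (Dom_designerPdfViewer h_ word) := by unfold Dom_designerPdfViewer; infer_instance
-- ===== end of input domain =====

-- B changes the decomposition: it scans the word's characters once, looking each up in the
-- letter→height dict, instead of A's scan over all 26 dict entries with a substring test each.

-- list(string.ascii_lowercase), shared by both ports
def pvAlphabet : List Char :=
  ['a','b','c','d','e','f','g','h','i','j','k','l','m',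
   'n','o','p','q','r','s','t','u','v','w','x','y','z']

-- ===== PORT A =====
def designerPdfViewer (h_ : List Int) (word : String) : Int :=
  let my_dict := (pvAlphabet.zip h_).foldl (fun d p => d.insert p.1 p.2) PySem.Dict.empty
  -- `key in word`: key is a one-character string, so the substring test is PySem.Str.isIn
  let s := my_dict.items.foldl
    (fun acc p => if PySem.Str.isIn (String.ofList [p.1]) word then acc ++ [p.2] else acc)
    ([] : List Int)
  let m := (PySem.List.max? s (fun x => x)).getD 0   -- max(s); Pre_ excludes s = [] (ValueError)
  let l := PySem.Str.len word
  m * l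

-- ===== PORT B =====
def designerPdfViewer_alt (h_ : List Int) (word : String) : Int :=
  let my_dict := PySem.Dict.ofList (pvAlphabet.zip h_)
  -- max(my_dict[c] for c in word if c in my_dict): guarded lookup over the word's chars
  let heights := word.toList.filterMap (fun c => my_dict.get? c)
  (PySem.List.max? heights (fun x => x)).getD 0 * PySem.Str.len word

-- ===== PRECONDITION & SPEC =====
-- Pre_ excludes exactly the inputs on which Python A raises ValueError (max() of an empty
-- sequence): words containing no letter among the first min(26, len(h)) lowercase letters.
def Pre_designerPdfViewer (h_ : List Int) (word : String) : Prop :=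
  ∃ p ∈ pvAlphabet.zip h_, p.1 ∈ word.toList
instance (h_ : List Int) (word : String) : Decidable (Pre_designerPdfViewer h_ word) := by
  unfold Pre_designerPdfViewer; infer_instance

def pvWitness_designerPdfViewer : List Int × String := ([3], "a")

def Spec_designerPdfViewer (h_ : List Int) (word : String) (out : Int) : Prop := out = designerPdfViewer_alt h_ word
instance (h_ : List Int) (word : String) (out : Int) : Decidable (Spec_designerPdfViewer h_ word out) := by unfold Spec_designerPdfViewer; infer_instance

-- ===== CLAIM (what is proved, stated in full; the proofs are below) =====
def Claim_equal_designerPdfViewer : Prop := ∀ (h_ : List Int) (word : String), Dom_designerPdfViewer h_ word → Pre_designerPdfViewer h_ word → Spec_designerPdfViewer h_ word (designerPdfViewer h_ word)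

-- ===== LEMMAS AND PROOFS =====

theorem pv_map_fst_zip_take {α β : Type} (l1 : List α) (l2 : List β) :
    (l1.zip l2).map Prod.fst = l1.take l2.length := by
  induction l1 generalizing l2 with
  | nil => simp
  | cons a t ih => cases l2 <;> simp [ih]

theorem pvZip_fst_nodup (h_ : List Int) : ((pvAlphabet.zip h_).map Prod.fst).Nodup := by
  rw [pv_map_fst_zip_take]
  exact (List.take_sublist _ _).nodup (by decide)

theorem pvDict_items (h_ : List Int) :
    ((pvAlphabet.zip h_).foldl (fun d p => d.insert p.1 p.2)
      (PySem.Dict.empty : PySem.Dict Char Int)).items = pvAlphabet.zip h_ := by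
  have := PySem.Dict.items_foldl_insert_fresh (pvAlphabet.zip h_) Prod.fst Prod.snd
    (PySem.Dict.empty : PySem.Dict Char Int)
    (by intro a _; simp [PySem.Dict.contains_empty]) (pvZip_fst_nodup h_)
  simpa using this

theorem pvIsIn_singleton (c : Char) (word : String) :
    PySem.Str.isIn (String.ofList [c]) word = true ↔ c ∈ word.toList := by
  rw [PySem.Str.isIn_iff_infix]
  have h : (String.ofList [c]).toList = [c] := Eq.symm (String.ofList_eq.mp rfl)
  rw [h]
  exact List.singleton_infix_iff c word.toList

theorem pvMemB (h_ : List Int) (word : String) (x : Int) :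
    x ∈ word.toList.filterMap (fun c => (PySem.Dict.ofList (pvAlphabet.zip h_)).get? c) ↔
      ∃ p ∈ pvAlphabet.zip h_, p.1 ∈ word.toList ∧ p.2 = x := by
  have hitems : (PySem.Dict.ofList (pvAlphabet.zip h_)).items = pvAlphabet.zip h_ :=
    pvDict_items h_
  have hnd : (PySem.Dict.ofList (pvAlphabet.zip h_)).keys.Nodup := by
    simp only [PySem.Dict.keys, hitems]; exact pvZip_fst_nodup h_
  rw [List.mem_filterMap]
  constructor
  · rintro ⟨c, hc, hget⟩
    rw [PySem.Dict.get?_eq_some_iff_mem_items _ _ _ hnd, hitems] at hget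
    exact ⟨(c, x), hget, hc, rfl⟩
  · rintro ⟨⟨c, v⟩, hp, hc, rfl⟩
    refine ⟨c, hc, ?_⟩
    rw [PySem.Dict.get?_eq_some_iff_mem_items _ _ _ hnd, hitems]
    exact hp

theorem pvMemA (h_ : List Int) (word : String) (x : Int) :
    x ∈ ((pvAlphabet.zip h_).filter
          (fun p => PySem.Str.isIn (String.ofList [p.1]) word)).map Prod.snd ↔
      ∃ p ∈ pvAlphabet.zip h_, p.1 ∈ word.toList ∧ p.2 = x := by
  simp only [List.mem_map, List.mem_filter, pvIsIn_singleton]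
  constructor
  · rintro ⟨p, ⟨hp, hw⟩, rfl⟩; exact ⟨p, hp, hw, rfl⟩
  · rintro ⟨p, hp, hw, rfl⟩; exact ⟨p, ⟨hp, hw⟩, rfl⟩

theorem pvMain (h_ : List Int) (word : String)
    (hpre : ∃ p ∈ pvAlphabet.zip h_, p.1 ∈ word.toList) :
    designerPdfViewer h_ word = designerPdfViewer_alt h_ word := by
  simp only [designerPdfViewer, designerPdfViewer_alt]
  rw [pvDict_items h_, PySem.List.foldl_append_if
    (fun p => PySem.Str.isIn (String.ofList [p.1]) word) Prod.snd (pvAlphabet.zip h_) []]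
  set sA := ((pvAlphabet.zip h_).filter
      (fun p => PySem.Str.isIn (String.ofList [p.1]) word)).map Prod.snd with hsA
  set sB := word.toList.filterMap (fun c => (PySem.Dict.ofList (pvAlphabet.zip h_)).get? c) with hsB
  have hset : ∀ x, x ∈ sA ↔ x ∈ sB := fun x => (pvMemA h_ word x).trans (pvMemB h_ word x).symm
  obtain ⟨p, hp, hw⟩ := hpre
  have hxA : p.2 ∈ sA := (pvMemA h_ word p.2).mpr ⟨p, hp, hw, rfl⟩
  have hxB : p.2 ∈ sB := (hset _).mp hxA
  obtain ⟨a, ha⟩ : ∃ a, PySem.List.max? sA (fun x => x) = some a := by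
    cases hcase : PySem.List.max? sA (fun x => x) with
    | none => rw [PySem.List.max?_eq_none_iff] at hcase; simp [hcase] at hxA
    | some a => exact ⟨a, rfl⟩
  obtain ⟨b, hb⟩ : ∃ b, PySem.List.max? sB (fun x => x) = some b := by
    cases hcase : PySem.List.max? sB (fun x => x) with
    | none => rw [PySem.List.max?_eq_none_iff] at hcase; simp [hcase] at hxB
    | some b => exact ⟨b, rfl⟩
  have hab : a = b := by
    have h1 : a ≤ b := PySem.List.max?_isMax hb a ((hset a).mp (PySem.List.max?_mem ha))
    have h2 : b ≤ a := PySem.List.max?_isMax ha b ((hset b).mpr (PySem.List.max?_mem hb))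
    omega
  simp only [List.nil_append, ha, hb, hab, Option.getD_some]

-- ===== VERDICT (by name: the statement is the Claim_ definition above) =====
theorem designerPdfViewer_spec : Claim_equal_designerPdfViewer := by
  intro h_ word _ hpre
  unfold Spec_designerPdfViewer
  exact pvMain h_ word hpre
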